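-- pv_equiv track=rewrite | github.com/Anatoly333/Info_tasks | Info_Anatoly/hold_em.py | find_straight_flush
-- ===== SOURCE A (Python) =====
-- def find_straight_flush(cards):
--     found = [0 for i in range(15)]
--     cnt = {'S': 0, 'C': 0, 'H': 0, 'D': 0}
--     mx = 0
--     m = 'S'
--     for card in cards:
--         cnt[card[1]] += 1
--         if mx < cnt[card[1]]:
--             mx = cnt[card[1]]
--             m = card[1]
--     if mx < 5:
--         return 0
--     for card in cards:
--         found[card[0]] = found[card[0]] or (card[1] == m)
--     sl = 0
--     best_fs = 0
--     if found[14] and found[2] and found[3] and found[4] and found[5]: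
--         best_fs = 5
--     for i in range(2, 15):
--         if found[i]:
--             sl += 1
--         else:
--             sl = 0
--         if sl >= 5:
--             best_fs = i
--     if best_fs:
--         return best_fs
--     return 0
-- ===== SOURCE B (Python) =====
-- def find_straight_flush(cards):
--     # Same suit-count pass and presence marking as the original (preserves the
--     # tie-break for the winning suit), but the straight search is a top-down
--     # 5-rank window scan with early return instead of a low-to-high run counter
--     # plus a separate wheel special-case.
--     found = [0] * 15
--     cnt = {'S': 0, 'C': 0, 'H': 0, 'D': 0}
--     mx = 0
--     m = 'S'
--     for card in cards:
--         cnt[card[1]] += 1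
--         if mx < cnt[card[1]]:
--             mx = cnt[card[1]]
--             m = card[1]
--     if mx < 5:
--         return 0
--     for card in cards:
--         found[card[0]] = found[card[0]] or (card[1] == m)
--     for high in range(14, 4, -1):
--         low4 = [high - 1, high - 2, high - 3, high - 4] if high > 5 else [4, 3, 2, 14]
--         if found[high] and all(found[r] for r in low4):
--             return high
--     return 0
-- ===== Notes on version B (the rewrite author's own statement) =====
-- stated objective: alternative
-- what changed: The straight search is rewritten: instead of a low-to-high run-length counter over ranks 2..14 plus a separate ace-low wheel special case, B scans candidate high cards top-down (14 down to 5) and returns the first high card whose 5-rank window (treating the ace as low for high=5) is fully present; the suit-count pass and presence-marking array are kept to preserve the tie-break and index semantics.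
import Mathlib
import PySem

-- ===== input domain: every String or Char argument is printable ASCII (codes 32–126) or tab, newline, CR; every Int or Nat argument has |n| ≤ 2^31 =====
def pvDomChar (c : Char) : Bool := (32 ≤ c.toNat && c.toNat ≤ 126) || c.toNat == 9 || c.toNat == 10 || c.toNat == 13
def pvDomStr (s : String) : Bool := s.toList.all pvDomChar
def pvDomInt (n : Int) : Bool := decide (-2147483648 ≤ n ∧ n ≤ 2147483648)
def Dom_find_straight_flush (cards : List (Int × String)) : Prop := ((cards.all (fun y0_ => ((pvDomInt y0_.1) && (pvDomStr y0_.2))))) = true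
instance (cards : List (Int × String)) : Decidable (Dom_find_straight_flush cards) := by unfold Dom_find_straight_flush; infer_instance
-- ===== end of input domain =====

-- B replaces A's low-to-high run counter + wheel special-case by a top-down 5-rank window
-- scan with early return; the suit-count pass and marking array are shared (alternative, not faster).

-- ===== PORT A =====
-- first loop of both Pythons: suit counts, winning suit m and its count mx (strict-improvement tie-break)
def pvSuitMax (cards : List (Int × String)) : Int × String :=
  (cards.foldl
    (fun (st : PySem.Dict String Int × Int × String) card =>
      let cnt := st.1.modify card.2 0 (· + 1)       -- cnt[card[1]] += 1 (key always present under Pre_)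
      let c := cnt.getD card.2 0
      if st.2.1 < c then (cnt, c, card.2) else (cnt, st.2.1, st.2.2))
    (PySem.Dict.ofList [("S", 0), ("C", 0), ("H", 0), ("D", 0)], 0, "S")).2

-- second loop of both Pythons: found[card[0]] = found[card[0]] or (card[1] == m)
-- (pySetD/pyGetD: Python index semantics; the IndexError case is excluded by Pre_)
def pvMark (cards : List (Int × String)) (m : String) : List Bool :=
  cards.foldl
    (fun f card =>
      PySem.List.pySetD f card.1 ((PySem.List.pyGetD f card.1 false) || (card.2 == m)))
    (List.replicate 15 false)

-- loop body of A's run-accumulation scan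
def pvStepA (f : List Bool) (st : Int × Int) (i : Int) : Int × Int :=
  let sl : Int := if PySem.List.pyGetD f i false then st.1 + 1 else 0
  (sl, if 5 ≤ sl then i else st.2)

-- A's straight search: wheel check, then run counter over range(2, 15)
def pvScanA (f : List Bool) : Int :=
  let best0 : Int :=
    if PySem.List.pyGetD f 14 false && PySem.List.pyGetD f 2 false &&
       PySem.List.pyGetD f 3 false && PySem.List.pyGetD f 4 false &&
       PySem.List.pyGetD f 5 false then 5 else 0
  let r := (PySem.List.pyRange 2 15 1).foldl (pvStepA f) (0, best0)
  if r.2 ≠ 0 then r.2 else 0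

def find_straight_flush (cards : List (Int × String)) : Int :=
  let s := pvSuitMax cards
  if s.1 < 5 then 0 else pvScanA (pvMark cards s.2)

-- ===== PORT B =====
-- B's window test for candidate high card h (ace counts low for h = 5)
def pvPredB (f : List Bool) (h : Int) : Bool :=
  PySem.List.pyGetD f h false &&
    (if 5 < h then
       PySem.List.pyGetD f (h - 1) false && PySem.List.pyGetD f (h - 2) false &&
       PySem.List.pyGetD f (h - 3) false && PySem.List.pyGetD f (h - 4) false
     else
       PySem.List.pyGetD f 4 false && PySem.List.pyGetD f 3 false &&
       PySem.List.pyGetD f 2 false && PySem.List.pyGetD f 14 false)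

-- B's straight search: for high in range(14, 4, -1): early return on the first full window
def pvScanB (f : List Bool) : Int :=
  ((PySem.List.pyRange 14 4 (-1)).find? (pvPredB f)).getD 0

def find_straight_flush_alt (cards : List (Int × String)) : Int :=
  let s := pvSuitMax cards
  if s.1 < 5 then 0 else pvScanB (pvMark cards s.2)

-- ===== PRECONDITION & SPEC =====
-- Pre_ is exactly where the Python returns: every suit must be a dict key (else KeyError in the
-- first loop), and if some suit reaches count 5 the marking loop runs, so every rank must be a
-- valid Python index into the 15-slot array (else IndexError).
def Pre_find_straight_flush (cards : List (Int × String)) : Prop :=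
  (∀ c ∈ cards, c.2 = "S" ∨ c.2 = "C" ∨ c.2 = "H" ∨ c.2 = "D") ∧
  ((∀ c ∈ cards, -15 ≤ c.1 ∧ c.1 ≤ 14) ∨
   (cards.countP (fun c => c.2 == "S") < 5 ∧ cards.countP (fun c => c.2 == "C") < 5 ∧
    cards.countP (fun c => c.2 == "H") < 5 ∧ cards.countP (fun c => c.2 == "D") < 5))
instance (cards : List (Int × String)) : Decidable (Pre_find_straight_flush cards) := by
  unfold Pre_find_straight_flush; infer_instance

def pvWitness_find_straight_flush : (List (Int × String)) :=
  [(14, "S"), (13, "S"), (12, "S"), (11, "S"), (10, "S"), (3, "H")]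

def Spec_find_straight_flush (cards : List (Int × String)) (out : Int) : Prop := out = find_straight_flush_alt cards
instance (cards : List (Int × String)) (out : Int) : Decidable (Spec_find_straight_flush cards out) := by unfold Spec_find_straight_flush; infer_instance

-- ===== CLAIM (what is proved, stated in full; the proofs are below) =====
def Claim_equal_find_straight_flush : Prop := ∀ (cards : List (Int × String)), Dom_find_straight_flush cards → Pre_find_straight_flush cards → Spec_find_straight_flush cards (find_straight_flush cards)

-- ===== LEMMAS AND PROOFS =====

-- run length after processing ranks 2 .. 2+n-1 (A's variable sl)
def pvRun (f : List Bool) : Nat → Int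
  | 0 => 0
  | n + 1 => if PySem.List.pyGetD f (2 + (n : Int)) false then pvRun f n + 1 else 0

-- A's best_fs after processing ranks 2 .. 2+n-1
def pvBest (f : List Bool) : Nat → Int
  | 0 =>
    if PySem.List.pyGetD f 14 false && PySem.List.pyGetD f 2 false &&
       PySem.List.pyGetD f 3 false && PySem.List.pyGetD f 4 false &&
       PySem.List.pyGetD f 5 false then 5 else 0
  | n + 1 => if 5 ≤ pvRun f (n + 1) then 2 + (n : Int) else pvBest f n

theorem pvFold_eq (f : List Bool) (n : Nat) :
    (PySem.List.pyRange 2 (2 + (n : Int)) 1).foldl (pvStepA f) (0, pvBest f 0)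
      = (pvRun f n, pvBest f n) := by
  induction n with
  | zero => simp [PySem.List.pyRange_one_eq_nil, pvRun]
  | succ n ih =>
      have h : (2 : Int) + ((n + 1 : Nat) : Int) = (2 + (n : Int)) + 1 := by push_cast; ring
      rw [h, PySem.List.pyRange_one_succ_right (by omega), List.foldl_append, ih]
      simp only [List.foldl, pvStepA, pvRun, pvBest]
      rfl

theorem pvRun_nonneg (f : List Bool) (n : Nat) : 0 ≤ pvRun f n := by
  induction n with
  | zero => simp [pvRun]
  | succ n ih => rw [pvRun]; split <;> omega

theorem pvRun_le (f : List Bool) (n : Nat) : pvRun f n ≤ n := by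
  induction n with
  | zero => simp [pvRun]
  | succ n ih => rw [pvRun]; split <;> [push_cast; push_cast] <;> omega

theorem pvLe_run_iff (f : List Bool) (k : Nat) : ∀ n : Nat, k ≤ n →
    (((k : Int) ≤ pvRun f n) ↔
      ∀ j : Nat, j < k → PySem.List.pyGetD f (2 + (n : Int) - 1 - (j : Int)) false = true) := by
  induction k with
  | zero =>
      intro n _
      simp [pvRun_nonneg]
  | succ k ih =>
      intro n hn
      obtain ⟨m, rfl⟩ : ∃ m, n = m + 1 := ⟨n - 1, by omega⟩
      rw [pvRun]
      by_cases hg : PySem.List.pyGetD f (2 + (m : Int)) false = true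
      · rw [if_pos hg]
        have base : ((k : Int) ≤ pvRun f m) ↔
            ∀ j : Nat, j < k → PySem.List.pyGetD f (2 + (m : Int) - 1 - (j : Int)) false = true :=
          ih m (by omega)
        constructor
        · intro hle j hj
          have hk : (k : Int) ≤ pvRun f m := by push_cast at hle ⊢; omega
          rcases Nat.eq_zero_or_pos j with rfl | hj0
          · have : (2 : Int) + ((m + 1 : Nat) : Int) - 1 - ((0 : Nat) : Int) = 2 + (m : Int) := by
              push_cast; ring
            rw [this]; exact hg
          · obtain ⟨j', rfl⟩ : ∃ j', j = j' + 1 := ⟨j - 1, by omega⟩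
            have hidx : (2 : Int) + ((m + 1 : Nat) : Int) - 1 - ((j' + 1 : Nat) : Int)
                = 2 + (m : Int) - 1 - (j' : Int) := by push_cast; ring
            rw [hidx]
            exact base.mp hk j' (by omega)
        · intro hall
          have hk : (k : Int) ≤ pvRun f m := by
            refine base.mpr ?_
            intro j hj
            have hidx : (2 : Int) + (m : Int) - 1 - (j : Int)
                = 2 + ((m + 1 : Nat) : Int) - 1 - ((j + 1 : Nat) : Int) := by push_cast; ring
            rw [hidx]
            exact hall (j + 1) (by omega)
          push_cast at hk ⊢; omega
      · rw [if_neg hg]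
        constructor
        · intro hle; exfalso; push_cast at hle; omega
        · intro hall
          exfalso
          apply hg
          have := hall 0 (by omega)
          have hidx : (2 : Int) + ((m + 1 : Nat) : Int) - 1 - ((0 : Nat) : Int) = 2 + (m : Int) := by
            push_cast; ring
          rwa [hidx] at this

theorem pvBest_small (f : List Bool) (n : Nat) (hn : n ≤ 4) : pvBest f n = pvBest f 0 := by
  induction n with
  | zero => rfl
  | succ n ih =>
      have hr : ¬ ((5 : Int) ≤ pvRun f (n + 1)) := by
        have h1 := pvRun_le f (n + 1)
        push_cast at h1 ⊢
        omega
      conv_lhs => rw [pvBest]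
      rw [if_neg hr, ih (by omega)]

theorem pvDescend (f : List Bool) : ∀ n : Nat, 4 ≤ n → n ≤ 13 →
    ((PySem.List.pyRange (1 + (n : Int)) 4 (-1)).find? (pvPredB f)).getD 0 = pvBest f n := by
  intro n
  induction n with
  | zero => omega
  | succ n ih =>
      intro _ hle
      rcases Nat.lt_or_ge n 4 with hn4 | hn4
      · -- n + 1 = 4 is the base case: the range is [5] and pvBest f 4 is the wheel check
        have hn : n = 3 := by omega
        subst hn
        have hr : PySem.List.pyRange (1 + ((3 + 1 : Nat) : Int)) 4 (-1) = [5] := by decide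
        rw [hr]
        rw [pvBest_small f 4 (by omega)]
        have hp : pvPredB f 5 =
            (PySem.List.pyGetD f 14 false && PySem.List.pyGetD f 2 false &&
             PySem.List.pyGetD f 3 false && PySem.List.pyGetD f 4 false &&
             PySem.List.pyGetD f 5 false) := by
          simp only [pvPredB, if_neg (by omega : ¬ (5 : Int) < 5)]
          cases PySem.List.pyGetD f 14 false <;> cases PySem.List.pyGetD f 2 false <;>
            cases PySem.List.pyGetD f 3 false <;> cases PySem.List.pyGetD f 4 false <;>
            cases PySem.List.pyGetD f 5 false <;> rfl
        by_cases hw : pvPredB f 5 = true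
        · rw [List.find?_cons_of_pos hw]
          rw [hp] at hw
          simp [pvBest, hw]
        · rw [List.find?_cons_of_neg hw]
          rw [hp] at hw
          simp [pvBest, hw]
      · -- inductive step: prepend candidate high card 2 + n to the descending range
        have hcons : PySem.List.pyRange (1 + ((n + 1 : Nat) : Int)) 4 (-1)
            = (2 + (n : Int)) :: PySem.List.pyRange (1 + (n : Int)) 4 (-1) := by
          have h1 : (1 : Int) + ((n + 1 : Nat) : Int) = 2 + (n : Int) := by push_cast; ring
          have h2 : (2 : Int) + (n : Int) - 1 = 1 + (n : Int) := by ring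
          rw [h1, PySem.List.pyRange_neg_one_cons (by omega), h2]
        have hwin : (pvPredB f (2 + (n : Int)) = true) ↔ ((5 : Int) ≤ pvRun f (n + 1)) := by
          rw [show ((5 : Int)) = ((5 : Nat) : Int) by norm_num,
            pvLe_run_iff f 5 (n + 1) (by omega)]
          simp only [pvPredB, if_pos (by omega : (5 : Int) < 2 + (n : Int)),
            Bool.and_eq_true]
          constructor
          · intro hconj j hj
            interval_cases j
            · have hidx : (2 : Int) + ((n + 1 : Nat) : Int) - 1 - ((0 : Nat) : Int)
                  = 2 + (n : Int) := by push_cast; ring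
              rw [hidx]; tauto
            · have hidx : (2 : Int) + ((n + 1 : Nat) : Int) - 1 - ((1 : Nat) : Int)
                  = 2 + (n : Int) - 1 := by push_cast; ring
              rw [hidx]; tauto
            · have hidx : (2 : Int) + ((n + 1 : Nat) : Int) - 1 - ((2 : Nat) : Int)
                  = 2 + (n : Int) - 2 := by push_cast; ring
              rw [hidx]; tauto
            · have hidx : (2 : Int) + ((n + 1 : Nat) : Int) - 1 - ((3 : Nat) : Int)
                  = 2 + (n : Int) - 3 := by push_cast; ring
              rw [hidx]; tauto
            · have hidx : (2 : Int) + ((n + 1 : Nat) : Int) - 1 - ((4 : Nat) : Int)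
                  = 2 + (n : Int) - 4 := by push_cast; ring
              rw [hidx]; tauto
          · intro hall
            have h0 := hall 0 (by omega)
            have h1 := hall 1 (by omega)
            have h2 := hall 2 (by omega)
            have h3 := hall 3 (by omega)
            have h4 := hall 4 (by omega)
            rw [show (2 : Int) + ((n + 1 : Nat) : Int) - 1 - ((0 : Nat) : Int)
                  = 2 + (n : Int) by push_cast; ring] at h0
            rw [show (2 : Int) + ((n + 1 : Nat) : Int) - 1 - ((1 : Nat) : Int)
                  = 2 + (n : Int) - 1 by push_cast; ring] at h1
            rw [show (2 : Int) + ((n + 1 : Nat) : Int) - 1 - ((2 : Nat) : Int)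
                  = 2 + (n : Int) - 2 by push_cast; ring] at h2
            rw [show (2 : Int) + ((n + 1 : Nat) : Int) - 1 - ((3 : Nat) : Int)
                  = 2 + (n : Int) - 3 by push_cast; ring] at h3
            rw [show (2 : Int) + ((n + 1 : Nat) : Int) - 1 - ((4 : Nat) : Int)
                  = 2 + (n : Int) - 4 by push_cast; ring] at h4
            tauto
        rw [hcons]
        by_cases hp : pvPredB f (2 + (n : Int)) = true
        · rw [List.find?_cons_of_pos hp]
          conv_rhs => rw [pvBest]
          rw [if_pos (hwin.mp hp)]
          rfl
        · rw [List.find?_cons_of_neg hp]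
          conv_rhs => rw [pvBest]
          rw [if_neg (fun h => hp (hwin.mpr h))]
          exact ih hn4 (by omega)

theorem pvScan_eq (f : List Bool) : pvScanA f = pvScanB f := by
  have hA : pvScanA f = pvBest f 13 := by
    have h15 : (2 : Int) + ((13 : Nat) : Int) = 15 := by norm_num
    have := pvFold_eq f 13
    rw [h15] at this
    show (if ((PySem.List.pyRange 2 15 1).foldl (pvStepA f) (0, pvBest f 0)).2 ≠ 0
          then ((PySem.List.pyRange 2 15 1).foldl (pvStepA f) (0, pvBest f 0)).2 else 0)
        = pvBest f 13
    rw [this]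
    by_cases h : pvBest f 13 = 0 <;> simp [h]
  have hB : pvScanB f = pvBest f 13 := by
    have h14 : (1 : Int) + ((13 : Nat) : Int) = 14 := by norm_num
    have := pvDescend f 13 (by omega) (by omega)
    rw [h14] at this
    exact this
  rw [hA, hB]

-- ===== VERDICT (by name: the statement is the Claim_ definition above) =====
theorem find_straight_flush_spec : Claim_equal_find_straight_flush := by
  intro cards _ _
  unfold Spec_find_straight_flush find_straight_flush find_straight_flush_alt
  by_cases h : (pvSuitMax cards).1 < 5
  · simp [h]
  · simp [h, pvScan_eq]
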